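-- pv_equiv track=rewrite | github.com/MrBrantCode/unitest_baseline | mut_generate/mist_train_cf/cf_9800/solution.py | sum_odd_following
-- ===== SOURCE A (Python) =====
-- def sum_odd_following(numbers):
--     result = {}
--     for i in range(len(numbers)):
--         if numbers[i] % 2 == 0:
--             odd_sum = sum(num for num in numbers[i+1:] if num % 2 != 0)
--             if odd_sum != 0:
--                 result[numbers[i]] = odd_sum
--     return result
-- ===== SOURCE B (Python) =====
-- def sum_odd_following(numbers):
--     # One backward pass keeps a running suffix sum of odds; then the even/sum
--     # pairs are replayed in original order into the result dict.
--     result = {}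
--     s = 0
--     pending = []
--     for num in reversed(numbers):
--         if num % 2 == 0:
--             pending.append((num, s))
--         else:
--             s += num
--     for num, odd_sum in reversed(pending):
--         if odd_sum != 0:
--             result[num] = odd_sum
--     return result
-- ===== Notes on version B (the rewrite author's own statement) =====
-- stated objective: faster
-- what changed: Instead of re-scanning and summing the whole suffix for every even element, B does one backward pass maintaining a running suffix-sum of odds and then replays the collected (even, sum) pairs in original order into the dict.
import Mathlib
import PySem

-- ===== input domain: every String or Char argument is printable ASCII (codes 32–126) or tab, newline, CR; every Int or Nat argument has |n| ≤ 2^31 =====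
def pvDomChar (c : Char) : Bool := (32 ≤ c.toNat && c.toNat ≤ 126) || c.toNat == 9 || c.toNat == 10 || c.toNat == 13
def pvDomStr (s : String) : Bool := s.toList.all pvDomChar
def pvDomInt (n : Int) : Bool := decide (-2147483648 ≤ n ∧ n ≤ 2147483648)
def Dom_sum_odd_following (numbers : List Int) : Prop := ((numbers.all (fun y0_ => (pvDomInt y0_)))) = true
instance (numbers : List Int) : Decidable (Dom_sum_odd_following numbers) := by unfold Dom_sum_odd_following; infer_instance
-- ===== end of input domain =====

-- B replaces A's per-even rescans of the suffix by one backward pass keeping a running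
-- suffix sum of odds (objective: faster, O(n^2) → O(n)).

-- ===== PORT A =====
def sum_odd_following (numbers : List Int) : List (Int × Int) :=
  ((PySem.List.pyRange 0 (numbers.length : Int) 1).foldl
    (fun (result : PySem.Dict Int Int) (i : Int) =>
      if PySem.Int.mod (PySem.List.pyGetD numbers i 0) 2 = 0 then
        let odd_sum :=
          ((PySem.List.slice numbers (some (i + 1)) none).filter
            (fun num => PySem.Int.mod num 2 != 0)).sum
        if odd_sum ≠ 0 then result.insert (PySem.List.pyGetD numbers i 0) odd_sum else result
      else result)
    PySem.Dict.empty).items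

-- ===== PORT B =====
def sum_odd_following_alt (numbers : List Int) : List (Int × Int) :=
  let st := numbers.reverse.foldl
    (fun (st : Int × List (Int × Int)) (num : Int) =>
      if PySem.Int.mod num 2 = 0 then (st.1, st.2 ++ [(num, st.1)]) else (st.1 + num, st.2))
    (0, [])
  (st.2.reverse.foldl
    (fun (result : PySem.Dict Int Int) (pr : Int × Int) =>
      if pr.2 ≠ 0 then result.insert pr.1 pr.2 else result)
    PySem.Dict.empty).items

-- ===== PRECONDITION & SPEC =====
def Spec_sum_odd_following (numbers : List Int) (out : List (Int × Int)) : Prop := out = sum_odd_following_alt numbers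
instance (numbers : List Int) (out : List (Int × Int)) : Decidable (Spec_sum_odd_following numbers out) := by unfold Spec_sum_odd_following; infer_instance

-- ===== CLAIM (what is proved, stated in full; the proofs are below) =====
def Claim_equal_sum_odd_following : Prop := ∀ (numbers : List Int), Dom_sum_odd_following numbers → Spec_sum_odd_following numbers (sum_odd_following numbers)

-- ===== LEMMAS AND PROOFS =====

/-- Sum of the odd elements of a list (the value A recomputes per even, B accumulates). -/
def pvOddSum (xs : List Int) : Int :=
  (xs.filter (fun num => PySem.Int.mod num 2 != 0)).sum

/-- The (even element, following-odd-sum) pairs in left-to-right order. -/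
def pvPairs : List Int → List (Int × Int)
  | [] => []
  | x :: xs => if PySem.Int.mod x 2 = 0 then (x, pvOddSum xs) :: pvPairs xs else pvPairs xs

def pvIns (result : PySem.Dict Int Int) (pr : Int × Int) : PySem.Dict Int Int :=
  if pr.2 ≠ 0 then result.insert pr.1 pr.2 else result

lemma pvOddSum_cons (x : Int) (xs : List Int) :
    pvOddSum (x :: xs) = (if PySem.Int.mod x 2 != 0 then x else 0) + pvOddSum xs := by
  unfold pvOddSum
  rw [List.filter_cons]
  cases hb : (PySem.Int.mod x 2 != 0) <;> simp

/-- B's backward loop, generalized over the running state. -/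
lemma B_loop (xs : List Int) (s : Int) (acc : List (Int × Int)) :
    xs.reverse.foldl
      (fun (st : Int × List (Int × Int)) (num : Int) =>
        if PySem.Int.mod num 2 = 0 then (st.1, st.2 ++ [(num, st.1)]) else (st.1 + num, st.2))
      (s, acc)
    = (pvOddSum xs + s, acc ++ ((pvPairs xs).map (fun p => (p.1, p.2 + s))).reverse) := by
  induction xs generalizing s acc with
  | nil => simp only [List.reverse_nil, List.foldl_nil, pvOddSum, pvPairs, List.filter_nil,
      List.sum_nil, zero_add, List.map_nil, List.reverse_nil, List.append_nil]
  | cons x xs ih =>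
    rw [List.reverse_cons, List.foldl_append, ih, List.foldl_cons, List.foldl_nil,
      pvOddSum_cons]
    show (if PySem.Int.mod x 2 = 0 then _ else _) = _
    by_cases h : PySem.Int.mod x 2 = 0
    · have hb : (PySem.Int.mod x 2 != 0) = false := by rw [h]; rfl
      rw [if_pos h, hb]
      show _ = ((0 : Int) + pvOddSum xs + s, _)
      rw [pvPairs]
      rw [if_pos h, List.map_cons, List.reverse_cons, zero_add, List.append_assoc]
    · have hb : (PySem.Int.mod x 2 != 0) = true := by
        simp only [bne_iff_ne]; exact h
      rw [if_neg h, hb]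
      show _ = ((x : Int) + pvOddSum xs + s, _)
      rw [pvPairs, if_neg h, Prod.mk.injEq]
      refine ⟨?_, rfl⟩
      show pvOddSum xs + s + x = x + pvOddSum xs + s
      ring

/-- A's indexed loop over the suffix equals the fold of pvIns over the pairs of the suffix. -/
lemma A_loop (suf pre : List Int) (d : PySem.Dict Int Int) :
    (PySem.List.pyRange (pre.length : Int) ((pre.length : Int) + (suf.length : Int)) 1).foldl
      (fun (result : PySem.Dict Int Int) (i : Int) =>
        if PySem.Int.mod (PySem.List.pyGetD (pre ++ suf) i 0) 2 = 0 then
          let odd_sum :=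
            ((PySem.List.slice (pre ++ suf) (some (i + 1)) none).filter
              (fun num => PySem.Int.mod num 2 != 0)).sum
          if odd_sum ≠ 0 then result.insert (PySem.List.pyGetD (pre ++ suf) i 0) odd_sum
          else result
        else result) d
    = (pvPairs suf).foldl pvIns d := by
  induction suf generalizing pre d with
  | nil => rw [pvPairs]; simp
  | cons x xs ih =>
    have hlt : (pre.length : Int) < (pre.length : Int) + ((x :: xs).length : Int) := by
      have : (0 : Int) < ((x :: xs).length : Int) := by
        exact_mod_cast Nat.succ_pos xs.length
      omega
    rw [PySem.List.pyRange_one_cons hlt, List.foldl_cons]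
    have hget : PySem.List.pyGetD (pre ++ x :: xs) (pre.length : Int) 0 = x := by
      rw [PySem.List.pyGetD_natCast]
      simp [List.getD]
    have hslice : PySem.List.slice (pre ++ x :: xs) (some ((pre.length : Int) + 1)) none = xs := by
      have h1 : (pre.length : Int) + 1 = ((pre.length + 1 : Nat) : Int) := by push_cast; ring
      rw [h1, PySem.List.slice_from_natCast]
      simp [List.drop_length_add_append (α := Int) 1]
    have harr : (pre.length : Int) + 1 = ((pre ++ [x]).length : Int) := by
      simp
    have harr2 : (pre.length : Int) + ((x :: xs).length : Int)
        = ((pre ++ [x]).length : Int) + (xs.length : Int) := by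
      simp; ring
    have hlist : pre ++ x :: xs = (pre ++ [x]) ++ xs := by simp
    show (PySem.List.pyRange ((pre.length : Int) + 1) _ 1).foldl _
        (if PySem.Int.mod (PySem.List.pyGetD (pre ++ x :: xs) (pre.length : Int) 0) 2 = 0
         then _ else d) = _
    rw [hget, hslice]
    by_cases h : PySem.Int.mod x 2 = 0
    · rw [if_pos h, harr2, harr, hlist, ih, pvPairs, if_pos h, List.foldl_cons]
      rfl
    · rw [if_neg h, harr2, harr, hlist, ih, pvPairs, if_neg h]

-- ===== VERDICT (by name: the statement is the Claim_ definition above) =====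
theorem sum_odd_following_spec : Claim_equal_sum_odd_following := by
  intro numbers _
  unfold Spec_sum_odd_following sum_odd_following sum_odd_following_alt
  rw [B_loop]
  have hA := A_loop numbers [] PySem.Dict.empty
  simp only [List.length_nil, Nat.cast_zero, List.nil_append, zero_add] at hA
  rw [hA]
  have hmap : (pvPairs numbers).map (fun p : Int × Int => (p.1, p.2 + 0)) = pvPairs numbers := by
    simp
  show ((pvPairs numbers).foldl pvIns PySem.Dict.empty).items
      = ((((pvPairs numbers).map (fun p : Int × Int => (p.1, p.2 + 0))).reverse.reverse).foldl
          _ PySem.Dict.empty).items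
  rw [List.reverse_reverse, hmap]
  rfl
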